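-- pv_equiv track=rewrite | github.com/btwhitehouse2/mpcs50101-2020-autumn-assignment-7-template | problem2.py | list_of_outcomes
-- ===== SOURCE A (Python) =====
-- from itertools import chain, permutations
--
-- def list_of_outcomes(rack):
--     """takes input of scrabble rack and creates all possible permutations """
--     temp_list_of_strings = []
--     list_of_permutations = []
--     lo, hi = 2, 7
--
--     for perm in chain.from_iterable(permutations(rack, i) for i in range(lo, hi + 1)):
--         temp_list_of_strings = (''.join(perm))
--         list_of_permutations.append(temp_list_of_strings)
--     return(list_of_permutations)
-- ===== SOURCE B (Python) =====
-- def list_of_outcomes(rack):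
--     """takes input of scrabble rack and creates all possible permutations """
--     chars = list(rack)
--     n = len(chars)
--     results = []
--     free_cache = {}
--
--     def free(m):
--         entries = free_cache.get(m)
--         if entries is None:
--             entries = [(chars[i], m | (1 << i)) for i in range(n) if not m >> i & 1]
--             free_cache[m] = entries
--         return entries
--
--     level = [('', 0)]
--     for r in range(1, 7):
--         level = [(s + c, m2) for (s, m) in level for (c, m2) in free(m)]
--         if r >= 2:
--             results.extend(s for (s, _) in level)
--     # final length (7): only the strings are needed, so skip building the masks
--     results.extend(s + c for (s, m) in level for (c, _) in free(m))
--     return results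
-- ===== Notes on version B (the rewrite author's own statement) =====
-- stated objective: alternative
-- what changed: Replaces itertools.permutations/chain (per-length generate-index-tuples-and-filter) by an iterative level-by-level extension: each length's permutations are built once from the previous length's, tracking used positions as a bitmask with memoized free-position lists.
import Mathlib
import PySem

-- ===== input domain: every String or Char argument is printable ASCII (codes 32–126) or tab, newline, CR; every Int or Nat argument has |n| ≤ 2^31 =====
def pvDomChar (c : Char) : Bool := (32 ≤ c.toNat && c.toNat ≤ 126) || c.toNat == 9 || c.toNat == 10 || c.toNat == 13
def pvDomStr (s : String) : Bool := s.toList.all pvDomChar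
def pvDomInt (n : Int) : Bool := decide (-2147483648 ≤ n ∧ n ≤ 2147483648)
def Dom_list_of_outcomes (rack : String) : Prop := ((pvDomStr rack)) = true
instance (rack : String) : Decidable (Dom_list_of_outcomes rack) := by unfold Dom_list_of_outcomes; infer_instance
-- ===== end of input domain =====

-- B replaces itertools' per-length generate-index-tuples-and-filter enumeration by an
-- iterative level-by-level extension: each length is built once from the previous one,
-- tracking used positions as a bitmask (objective: alternative; same output order).

-- ===== PORT A =====
-- itertools.permutations(pool, r) is ported by its documented equivalent:
-- all r-tuples of indices from product(range(n), repeat=r), kept when len(set(indices)) == r,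
-- each mapped to the corresponding elements of the pool (same order, same duplicates).
def pvIdxTuples (n : Nat) : Nat → List (List Nat)
  | 0 => [[]]
  | r + 1 => (List.range n).flatMap (fun i => (pvIdxTuples n r).map (i :: ·))

def pvPermutations (pool : List Char) (r : Nat) : List (List Char) :=
  ((pvIdxTuples pool.length r).filter (fun t => (PySem.Set.ofList t).length == r)).map
    (fun t => t.map (fun i => pool.getD i ' '))   -- indices always in range, so getD is exact

def list_of_outcomes (rack : String) : List String :=
  -- lo, hi = 2, 7; chain.from_iterable over i in range(lo, hi+1); ''.join(perm) appended
  (List.range' 2 6).flatMap (fun i => (pvPermutations rack.toList i).map (fun p => String.ofList p))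

-- ===== PORT B =====
-- free(m): the (char, new mask) pairs for the positions i not marked in bitmask m
-- (Source B memoizes this per mask in free_cache; the cache is transparent, so the port recomputes).
def pvFree (chars : List Char) (m : Nat) : List (Char × Nat) :=
  (List.range chars.length).flatMap (fun i =>
    if (m >>> i) &&& 1 == 0 then [(chars.getD i ' ', m ||| 1 <<< i)] else [])

-- one pass of the loop body: extend every (string, mask) of the level by each free position
def pvStep (chars : List Char) (lv : List (String × Nat)) : List (String × Nat) :=
  lv.flatMap (fun p => (pvFree chars p.2).map (fun q => (p.1.push q.1, q.2)))

def list_of_outcomes_alt (rack : String) : List String :=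
  let chars := rack.toList
  -- for r in range(1, 7): level = [...]; if r >= 2: results.extend(s for (s, _) in level)
  let st := (List.range' 1 6).foldl (fun (acc : List (String × Nat) × List String) r =>
      let lv := pvStep chars acc.1
      (lv, if 2 ≤ r then acc.2 ++ lv.map (fun p => p.1) else acc.2)) ([("", 0)], [])
  -- final length (7): results.extend(s + c for (s, m) in level for (c, _) in free(m))
  st.2 ++ st.1.flatMap (fun p => (pvFree chars p.2).map (fun q => p.1.push q.1))

-- ===== PRECONDITION & SPEC =====
def Spec_list_of_outcomes (rack : String) (out : List String) : Prop := out = list_of_outcomes_alt rack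
instance (rack : String) (out : List String) : Decidable (Spec_list_of_outcomes rack out) := by unfold Spec_list_of_outcomes; infer_instance

-- ===== CLAIM (what is proved, stated in full; the proofs are below) =====
def Claim_equal_list_of_outcomes : Prop := ∀ (rack : String), Dom_list_of_outcomes rack → Spec_list_of_outcomes rack (list_of_outcomes rack)

-- ===== LEMMAS AND PROOFS =====

-- proof-side view of B's search: the strings of every completion of state (s, m) in r more steps
def pvG (chars : List Char) : Nat → String × Nat → List String
  | 0, p => [p.1]
  | r + 1, p => (pvFree chars p.2).flatMap (fun q => pvG chars r (p.1.push q.1, q.2))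

-- proof-side view of B's loop: the level after k passes
def pvIter (chars : List Char) : Nat → List (String × Nat)
  | 0 => [("", 0)]
  | k + 1 => pvStep chars (pvIter chars k)

-- every tuple produced by pvIdxTuples n r has length r
lemma pv_len_idxTuples (n : Nat) : ∀ (r : Nat) (t : List Nat), t ∈ pvIdxTuples n r → t.length = r := by
  intro r
  induction r with
  | zero => intro t ht; simp [pvIdxTuples] at ht; simp [ht]
  | succ r ih =>
      intro t ht
      simp only [pvIdxTuples, List.mem_flatMap, List.mem_map] at ht
      obtain ⟨i, -, s, hs, rfl⟩ := ht
      simp [ih s hs]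

-- len(set(t)) = len(t) iff t has no duplicates
lemma pv_ofList_length_eq_iff (t : List Nat) :
    (PySem.Set.ofList t).length = t.length ↔ t.Nodup := by
  constructor
  · intro h
    have hfin : (PySem.Set.ofList t).toFinset = t.toFinset := by
      ext x; simp [PySem.Set.mem_ofList]
    have h1 : (PySem.Set.ofList t).toFinset.card = (PySem.Set.ofList t).length :=
      List.toFinset_card_of_nodup (PySem.Set.nodup_ofList t)
    have h2 : t.toFinset.card = t.dedup.length := List.card_toFinset t
    have hlen : t.dedup.length = t.length := by
      rw [← h2, ← hfin, h1, h]
    have : t.dedup = t := (List.dedup_sublist t).eq_of_length hlen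
    exact List.dedup_eq_self.mp this
  · intro h; rw [PySem.Set.ofList_eq_self_of_nodup t h]

-- A's filter condition, on tuples of pvIdxTuples, is exactly Nodup
lemma pv_filterA (n r : Nat) :
    (pvIdxTuples n r).filter (fun t => (PySem.Set.ofList t).length == r) =
    (pvIdxTuples n r).filter (fun t => decide t.Nodup) := by
  apply List.filter_congr
  intro t ht
  have hl : t.length = r := pv_len_idxTuples n r t ht
  subst hl
  apply Bool.eq_iff_iff.mpr
  simp [pv_ofList_length_eq_iff]

lemma pv_bit (m i : Nat) : ((m >>> i) &&& 1 == 0) = !(m.testBit i) := by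
  simp only [Nat.and_one_is_mod, Nat.testBit, Nat.one_and_eq_mod_two]
  rcases Nat.mod_two_eq_zero_or_one (m >>> i) with h | h <;> rw [h] <;> rfl

lemma pv_testBit_or (m i j : Nat) : (m ||| 1 <<< i).testBit j ↔ m.testBit j ∨ j = i := by
  rw [Nat.testBit_or, Nat.shiftLeft_eq, one_mul, Nat.testBit_two_pow]
  simp only [Bool.or_eq_true, decide_eq_true_eq]
  exact or_congr Iff.rfl ⟨Eq.symm, Eq.symm⟩

lemma pv_push_append (s : String) (c : Char) (l : List Char) :
    (s.push c) ++ String.ofList l = s ++ String.ofList (c :: l) := by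
  have h1 : c :: l = [c] ++ l := rfl
  rw [h1, String.ofList_append, ← String.append_assoc]
  congr 1

-- map fst as a flatMap of singletons
lemma pv_flatMap_singleton (lv : List (String × Nat)) :
    lv.flatMap (fun p => [p.1]) = lv.map (fun p => p.1) := by
  induction lv with
  | nil => rfl
  | cons p lv ih => simp [ih]

-- the search equals A's filtered index-tuple enumeration
lemma pv_G_eq (cs : List Char) : ∀ (r : Nat) (s : String) (m : Nat),
    pvG cs r (s, m) =
    ((pvIdxTuples cs.length r).filter (fun t => decide (t.Nodup ∧ ∀ j ∈ t, ¬ m.testBit j))).map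
      (fun t => s ++ String.ofList (t.map (fun i => cs.getD i ' '))) := by
  intro r
  induction r with
  | zero => intro s m; simp [pvG, pvIdxTuples]
  | succ r ih =>
      intro s m
      simp only [pvG, pvIdxTuples, pvFree]
      rw [List.flatMap_assoc, List.filter_flatMap, List.map_flatMap]
      apply congrArg (fun f => List.flatMap f (List.range cs.length))
      funext i
      rw [pv_bit]
      cases hib : m.testBit i with
      | true =>
          have hnil : ((pvIdxTuples cs.length r).filter
              ((fun t => decide (t.Nodup ∧ ∀ j ∈ t, ¬ m.testBit j)) ∘ (i :: ·))) = [] := by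
            apply List.filter_eq_nil_iff.mpr
            intro t _
            simp only [Function.comp_apply, decide_eq_true_eq, not_and]
            intro _ hall
            exact absurd hib (hall i (by simp))
          rw [List.filter_map, hnil]
          simp
      | false =>
          have hi : ¬ m.testBit i = true := by simp [hib]
          simp only [Bool.not_false, if_true, List.flatMap_cons, List.flatMap_nil,
            List.append_nil, ih, List.filter_map, List.map_map]
          have hp : ((fun t => decide (t.Nodup ∧ ∀ j ∈ t, ¬ m.testBit j)) ∘ (i :: ·)) =
              (fun t => decide (t.Nodup ∧ ∀ j ∈ t, ¬ (m ||| 1 <<< i).testBit j)) := by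
            funext t
            apply decide_eq_decide.mpr
            simp only [List.nodup_cons, List.mem_cons, pv_testBit_or]
            constructor
            · rintro ⟨⟨hit, hnd⟩, hall⟩
              refine ⟨hnd, fun j hj => ?_⟩
              rintro (hju | rfl)
              · exact hall j (Or.inr hj) hju
              · exact hit hj
            · rintro ⟨hnd, hall⟩
              refine ⟨⟨fun hit => (hall i hit) (Or.inr rfl), hnd⟩, ?_⟩
              rintro j (rfl | hj)
              · exact hi
              · exact fun hju => hall j hj (Or.inl hju)
          rw [hp]
          apply List.map_congr_left
          intro t _
          simp [pv_push_append]

-- one loop pass commutes with the search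
lemma pv_step_G (cs : List Char) (r : Nat) (lv : List (String × Nat)) :
    (pvStep cs lv).flatMap (pvG cs r) = lv.flatMap (pvG cs (r + 1)) := by
  unfold pvStep
  rw [List.flatMap_assoc]
  apply congrArg (fun f => List.flatMap f lv)
  funext p
  rw [List.flatMap_map]
  rfl

-- the level after k passes, flattened through the search, is the search from the start
lemma pv_iter_G (cs : List Char) : ∀ (k r : Nat),
    (pvIter cs k).flatMap (pvG cs r) = pvG cs (r + k) ("", 0) := by
  intro k
  induction k with
  | zero => intro r; simp [pvIter]
  | succ k ih =>
      intro r
      have : r + (k + 1) = (r + 1) + k := by omega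
      rw [this, ← ih (r + 1), pvIter, pv_step_G]

-- the strings of the level after k passes are exactly A's permutations of length k
lemma pv_level_strings (cs : List Char) (k : Nat) :
    (pvIter cs k).map (fun p => p.1) = (pvPermutations cs k).map (fun p => String.ofList p) := by
  have h0 : (pvIter cs k).map (fun p => p.1) = (pvIter cs k).flatMap (pvG cs 0) := by
    rw [← pv_flatMap_singleton]
    rfl
  rw [h0, pv_iter_G, Nat.zero_add, pv_G_eq]
  unfold pvPermutations
  rw [pv_filterA, List.map_map]
  have hf : (fun t : List Nat => decide (t.Nodup ∧ ∀ j ∈ t, ¬ Nat.testBit 0 j = true)) =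
      (fun t : List Nat => decide t.Nodup) := by
    funext t
    apply decide_eq_decide.mpr
    simp [Nat.zero_testBit]
  rw [hf]
  apply List.map_congr_left
  intro t _
  simp

-- the trailing extend over free(m) is the next level's strings
lemma pv_final (cs : List Char) (k : Nat) :
    (pvIter cs k).flatMap (fun p => (pvFree cs p.2).map (fun q => p.1.push q.1)) =
    (pvIter cs (k + 1)).map (fun p => p.1) := by
  show _ = (pvStep cs (pvIter cs k)).map (fun p => p.1)
  unfold pvStep
  rw [List.map_flatMap]
  apply congrArg (fun f => List.flatMap f (pvIter cs k))
  funext p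
  rw [List.map_map]
  rfl

set_option maxHeartbeats 2000000 in
theorem list_of_outcomes_spec : Claim_equal_list_of_outcomes := by
  intro rack _
  unfold Spec_list_of_outcomes
  have hA : list_of_outcomes rack =
      (pvPermutations rack.toList 2).map (fun p => String.ofList p) ++
      ((pvPermutations rack.toList 3).map (fun p => String.ofList p) ++
      ((pvPermutations rack.toList 4).map (fun p => String.ofList p) ++
      ((pvPermutations rack.toList 5).map (fun p => String.ofList p) ++
      ((pvPermutations rack.toList 6).map (fun p => String.ofList p) ++
      ((pvPermutations rack.toList 7).map (fun p => String.ofList p) ++ []))))) := rfl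
  have hB : list_of_outcomes_alt rack =
      (((((([] : List String) ++ (pvIter rack.toList 2).map (fun p => p.1)) ++
        (pvIter rack.toList 3).map (fun p => p.1)) ++
        (pvIter rack.toList 4).map (fun p => p.1)) ++
        (pvIter rack.toList 5).map (fun p => p.1)) ++
        (pvIter rack.toList 6).map (fun p => p.1)) ++
        (pvIter rack.toList 6).flatMap
          (fun p => (pvFree rack.toList p.2).map (fun q => p.1.push q.1)) := rfl
  rw [hA, hB, pv_final]
  simp only [pv_level_strings]
  simp [List.append_assoc]
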